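-- pv_equiv track=rewrite | github.com/ambersariya/advent-of-code-2021 | advent_of_code_2021/depth_calculator.py | convert_readings
-- ===== SOURCE A (Python) =====
-- from functools import reduce
--
-- class NotEnoughReadingsToConvert(Exception):
--     pass
--
-- def convert_readings(sonar_readings) -> list[int]:
--     if len(sonar_readings) < 3:
--         raise NotEnoughReadingsToConvert()
--     if len(sonar_readings) == 3:
--         return [reduce(lambda a, b: a + b, sonar_readings)]
--     last_reading_block_starts = len(sonar_readings) - 3
--     readings = []
--     for index, _ in enumerate(sonar_readings[:last_reading_block_starts+1]):
--         readings.append(sonar_readings[index] + sonar_readings[index+1] + sonar_readings[index+2])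
--     return readings
-- ===== SOURCE B (Python) =====
-- class NotEnoughReadingsToConvert(Exception):
--     pass
--
-- def convert_readings(sonar_readings) -> list[int]:
--     if len(sonar_readings) < 3:
--         raise NotEnoughReadingsToConvert()
--     prefix = [0]
--     for x in sonar_readings:
--         prefix.append(prefix[-1] + x)
--     return [prefix[i + 3] - prefix[i] for i in range(len(sonar_readings) - 2)]
-- ===== Notes on version B (the rewrite author's own statement) =====
-- stated objective: alternative
-- what changed: Builds a cumulative prefix-sum table in one pass and emits each window sum as prefix[i+3]-prefix[i], instead of re-summing three elements per window (and instead of A's separate reduce branch for length 3).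
import Mathlib
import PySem

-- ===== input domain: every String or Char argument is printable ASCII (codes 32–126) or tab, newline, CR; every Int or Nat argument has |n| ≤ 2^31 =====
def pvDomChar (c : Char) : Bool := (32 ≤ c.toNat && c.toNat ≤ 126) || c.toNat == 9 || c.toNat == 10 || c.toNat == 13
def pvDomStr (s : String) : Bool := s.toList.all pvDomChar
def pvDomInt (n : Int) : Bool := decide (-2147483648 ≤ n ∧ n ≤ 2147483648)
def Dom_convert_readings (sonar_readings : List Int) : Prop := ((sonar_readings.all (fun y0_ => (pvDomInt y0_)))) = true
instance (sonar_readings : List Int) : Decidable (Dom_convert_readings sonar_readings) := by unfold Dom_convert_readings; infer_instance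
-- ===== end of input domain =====

-- B replaces per-window re-summation with a prefix-sum table built once and differenced
-- (an alternative decomposition of the same O(n) task; the len<3 exception behaviour is unchanged).

-- ===== PORT A =====
def convert_readings (sonar_readings : List Int) : List Int :=
  if (sonar_readings.length : Int) < 3 then []   -- Python raises NotEnoughReadingsToConvert; excluded by Pre_
  else if (sonar_readings.length : Int) == 3 then
    -- reduce(lambda a, b: a + b, sonar_readings) over a nonempty list
    match sonar_readings with
    | [] => []   -- unreachable: length = 3
    | x :: rest => [rest.foldl (fun a b => a + b) x]
  else
    let last_reading_block_starts : Int := (sonar_readings.length : Int) - 3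
    (PySem.List.enumerate (PySem.List.slice sonar_readings none (some (last_reading_block_starts + 1))) 0).foldl
      (fun readings p =>
        readings ++ [PySem.List.pyGetD sonar_readings p.1 0 +
                     PySem.List.pyGetD sonar_readings (p.1 + 1) 0 +
                     PySem.List.pyGetD sonar_readings (p.1 + 2) 0]) []

-- ===== PORT B =====
def convert_readings_alt (sonar_readings : List Int) : List Int :=
  if (sonar_readings.length : Int) < 3 then []   -- Python raises NotEnoughReadingsToConvert; excluded by Pre_
  else
    let pref := sonar_readings.foldl
      (fun acc x => acc ++ [PySem.List.pyGetD acc (-1) 0 + x]) [(0 : Int)]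
    (PySem.List.pyRange 0 ((sonar_readings.length : Int) - 2) 1).map
      (fun i => PySem.List.pyGetD pref (i + 3) 0 - PySem.List.pyGetD pref i 0)

-- ===== PRECONDITION & SPEC =====
-- Pre_ excludes exactly the inputs (fewer than 3 readings) on which A raises NotEnoughReadingsToConvert.
def Pre_convert_readings (sonar_readings : List Int) : Prop := 3 ≤ sonar_readings.length
instance (sonar_readings : List Int) : Decidable (Pre_convert_readings sonar_readings) := by
  unfold Pre_convert_readings; infer_instance

def pvWitness_convert_readings : List Int := [1, 2, 3, 4]

def Spec_convert_readings (sonar_readings : List Int) (out : List Int) : Prop := out = convert_readings_alt sonar_readings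
instance (sonar_readings : List Int) (out : List Int) : Decidable (Spec_convert_readings sonar_readings out) := by unfold Spec_convert_readings; infer_instance

-- ===== CLAIM (what is proved, stated in full; the proofs are below) =====
def Claim_equal_convert_readings : Prop := ∀ (sonar_readings : List Int), Dom_convert_readings sonar_readings → Pre_convert_readings sonar_readings → Spec_convert_readings sonar_readings (convert_readings sonar_readings)

-- ===== LEMMAS AND PROOFS =====

-- the prefix-sum loop builds the table of partial sums
theorem pv_prefix_eq (l : List Int) :
    l.foldl (fun acc x => acc ++ [PySem.List.pyGetD acc (-1) 0 + x]) [(0 : Int)]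
      = (List.range (l.length + 1)).map (fun k => (l.take k).sum) := by
  induction l using List.reverseRecOn with
  | nil => simp
  | append_singleton t x ih =>
    rw [List.foldl_append, ih, List.range_succ, List.map_append]
    simp only [List.foldl_cons, List.foldl_nil, List.map_cons, List.map_nil]
    rw [PySem.List.pyGetD_neg_one_append_singleton, List.take_length]
    simp only [List.length_append, List.length_cons, List.length_nil]
    rw [List.range_succ, List.map_append]
    simp only [List.map_cons, List.map_nil]
    congr 1
    · rw [List.range_succ, List.map_append]
      simp only [List.map_cons, List.map_nil]
      congr 1
      · apply List.map_congr_left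
        intro k hk
        rw [List.mem_range] at hk
        rw [List.take_append_of_le_length (by omega)]
      · rw [List.take_append_of_le_length (by omega), List.take_length]
    · rw [show t.length + 1 = (t ++ [x]).length by simp, List.take_length]
      simp

-- indexing the prefix table
theorem pv_prefix_get (l : List Int) (k : Nat) (hk : k ≤ l.length) :
    PySem.List.pyGetD (l.foldl (fun acc x => acc ++ [PySem.List.pyGetD acc (-1) 0 + x]) [(0 : Int)]) (k : Int) 0
      = (l.take k).sum := by
  rw [pv_prefix_eq, PySem.List.pyGetD_natCast]
  rw [List.getD_eq_getElem _ _ (by simp; omega)]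
  simp

-- a three-element window as a difference of partial sums
theorem pv_window_diff (l : List Int) (k : Nat) (hk : k + 3 ≤ l.length) :
    (l.take (k + 3)).sum - (l.take k).sum
      = l.getD k 0 + l.getD (k + 1) 0 + l.getD (k + 2) 0 := by
  have h0 : k < l.length := by omega
  have h1 : k + 1 < l.length := by omega
  have h2 : k + 2 < l.length := by omega
  have t1 : (l.take (k + 1)).sum = (l.take k).sum + l[k] := List.sum_take_succ _ _ h0
  have t2 : (l.take (k + 2)).sum = (l.take (k + 1)).sum + l[k + 1] := List.sum_take_succ _ _ h1
  have t3 : (l.take (k + 3)).sum = (l.take (k + 2)).sum + l[k + 2] := List.sum_take_succ _ _ h2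
  rw [List.getD_eq_getElem _ _ h0, List.getD_eq_getElem _ _ h1, List.getD_eq_getElem _ _ h2]
  omega

-- ===== VERDICT (by name: the statement is the Claim_ definition above) =====
theorem convert_readings_spec : Claim_equal_convert_readings := by
  intro sr _hdom hpre
  unfold Pre_convert_readings at hpre
  unfold Spec_convert_readings
  have h3 : (3 : Int) ≤ (sr.length : Int) := by exact_mod_cast hpre
  have hB : convert_readings_alt sr
      = (PySem.List.pyRange 0 ((sr.length : Int) - 2) 1).map
          (fun i => PySem.List.pyGetD
              (sr.foldl (fun acc x => acc ++ [PySem.List.pyGetD acc (-1) 0 + x]) [(0 : Int)]) (i + 3) 0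
            - PySem.List.pyGetD
              (sr.foldl (fun acc x => acc ++ [PySem.List.pyGetD acc (-1) 0 + x]) [(0 : Int)]) i 0) := by
    unfold convert_readings_alt
    rw [if_neg (by omega)]
  rw [hB]
  by_cases hlen : sr.length = 3
  · -- length exactly 3: the reduce branch against a single prefix difference
    obtain ⟨a, b, c, rfl⟩ : ∃ a b c, sr = [a, b, c] := by
      match sr, hlen with
      | [a, b, c], _ => exact ⟨a, b, c, rfl⟩
    unfold convert_readings
    rw [if_neg (by norm_num), if_pos (by norm_num)]
    rw [pv_prefix_eq]
    norm_num [PySem.List.pyRange_one, List.range_succ, List.take_succ_cons,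
      PySem.List.pyGetD, PySem.List.pyIdx?, PySem.List.pyGet?]
    simp only [show Int.toNat 3 = 3 from rfl, List.getElem_cons_succ, List.getElem_cons_zero]
    ring
  · -- length at least 4: A's enumerate loop against the prefix differences
    have hA : convert_readings sr
        = (PySem.List.enumerate
            (PySem.List.slice sr none (some ((sr.length : Int) - 3 + 1))) 0).foldl
            (fun readings p =>
              readings ++ [PySem.List.pyGetD sr p.1 0 +
                          PySem.List.pyGetD sr (p.1 + 1) 0 +
                          PySem.List.pyGetD sr (p.1 + 2) 0]) [] := by
      unfold convert_readings
      rw [if_neg (by omega), if_neg (by simp; omega)]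
    rw [hA, PySem.List.foldl_append_singleton_eq_map, List.nil_append]
    have hslice : PySem.List.slice sr none (some ((sr.length : Int) - 3 + 1))
        = sr.take (sr.length - 2) := by
      have h2 : ((sr.length : Int) - 3 + 1) = ((sr.length - 2 : Nat) : Int) := by omega
      rw [h2, PySem.List.slice_to_natCast]
    rw [hslice]
    have hlenslice : ((sr.take (sr.length - 2)).length : Int) = (sr.length : Int) - 2 := by
      simp [List.length_take]
      omega
    rw [show (PySem.List.enumerate (sr.take (sr.length - 2)) 0).map
          (fun p => PySem.List.pyGetD sr p.1 0 + PySem.List.pyGetD sr (p.1 + 1) 0 +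
                    PySem.List.pyGetD sr (p.1 + 2) 0)
        = ((PySem.List.enumerate (sr.take (sr.length - 2)) 0).map (·.1)).map
          (fun i => PySem.List.pyGetD sr i 0 + PySem.List.pyGetD sr (i + 1) 0 +
                    PySem.List.pyGetD sr (i + 2) 0) from by rw [List.map_map]; rfl]
    rw [PySem.List.map_fst_enumerate, zero_add, hlenslice]
    -- both sides map over the same range; compare pointwise
    apply List.map_congr_left
    intro i hi
    rw [PySem.List.mem_pyRange_one] at hi
    obtain ⟨hi0, hi1⟩ := hi
    obtain ⟨k, rfl⟩ : ∃ k : Nat, i = (k : Int) := ⟨i.toNat, by omega⟩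
    have hk3 : k + 3 ≤ sr.length := by omega
    have e1 : (k : Int) + 3 = ((k + 3 : Nat) : Int) := by push_cast; ring
    have e2 : (k : Int) + 1 = ((k + 1 : Nat) : Int) := by push_cast; ring
    have e3 : (k : Int) + 2 = ((k + 2 : Nat) : Int) := by push_cast; ring
    rw [e1, e2, e3, pv_prefix_get sr (k + 3) hk3, pv_prefix_get sr k (by omega),
        pv_window_diff sr k hk3]
    simp only [PySem.List.pyGetD_natCast]
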